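-- pv_equiv track=rewrite | github.com/charleskawczynski/MOONS | python_generator/generator/code_formatting.py | indent_lines
-- ===== SOURCE A (Python) =====
-- def break_single_line(s_0):
--   s = s_0
--   n_max_characters = 70
--   result = [s]
--   if not type(s_0)==str:
--     raise NameError('Bad input to break_single_line')
--   if (len(s) >= n_max_characters and not ';' in s_0):
--     potential_break_locations = [',']
--     # potential_break_locations = [')','(',',']
--     PBL = potential_break_locations
--     n_spaces = len(s) - len(s.lstrip(' '))
--     spaces = n_spaces*' '
--     s_max = s[0:n_max_characters]
--     if any(x in s_max for x in PBL):
--       cutoff = [s_max.rfind(x)+1 for x in PBL]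
--       cutoff = min([x for x in cutoff if not x==0])
--       s_cut = s_max[0:cutoff] + '&'
--       s_remain = s[cutoff:]
--       if (s_remain=='&'):
--         s_remain=''
--       result = [s_cut]
--       if not (len(s_remain.replace(' ','')) <= 0):
--           result = result + break_single_line(spaces + s_remain)
--   else:
--     result = [s]
--   return result
--
-- def get_n_leading_white_spaces(L):
--   temp = [len(x)-len(x.lstrip()) for x in L if (not x=='') and x]
--   if temp:
--     if (len(temp)==1):
--       if temp[0]==0:
--         temp = 0
--     else:
--       temp = min(temp)
--   else:
--     temp = 0
--   return temp
--
-- def indent_lines(L):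
--   n_leading_white_space = get_n_leading_white_spaces(L)
--   L = [x.lstrip() for x in L]
--   indent = '  '
--   T_up = ('if ','type ','subroutine ','function ','do ')
--   T_dn = ('endif','end type','end subroutine','end function','enddo','end module')
--   T_unindent = ['else','elseif']
--   indent_cumulative = ''
--   s_indent = len(indent)
--   temp = ['' for x in L]
--   for i,x in enumerate(L):
--     if x.startswith(T_dn):
--       indent_cumulative = indent_cumulative[s_indent:]
--     temp[i]=indent_cumulative+temp[i]
--     if x.startswith(T_up):
--       indent_cumulative = indent_cumulative + indent
--   L = [s+x for (s,x) in zip(temp,L)]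
--   L = [break_single_line(x) for x in L]
--   L = [item for sublist in L for item in sublist]
--   L = [x[s_indent:] if any([y in x for y in T_unindent]) else x for x in L]
--   L = [n_leading_white_space*' '+x if not x=='' else x for x in L]
--   return L
-- ===== SOURCE B (Python) =====
-- T_UP = ('if ', 'type ', 'subroutine ', 'function ', 'do ')
-- T_DN = ('endif', 'end type', 'end subroutine', 'end function', 'enddo', 'end module')
--
--
-- def break_single_line(s_0):
--     if not type(s_0) == str:
--         raise NameError('Bad input to break_single_line')
--     out = []
--     cur = s_0
--     while True:
--         if len(cur) >= 70 and ';' not in cur: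
--             head = cur[:70]
--             cutoff = head.rfind(',') + 1
--             if cutoff != 0:
--                 out.append(head[:cutoff] + '&')
--                 remain = cur[cutoff:]
--                 if remain == '&':
--                     remain = ''
--                 if len(remain.replace(' ', '')) <= 0:
--                     return out
--                 n_spaces = len(cur) - len(cur.lstrip(' '))
--                 cur = n_spaces * ' ' + remain
--                 continue
--         out.append(cur)
--         return out
--
--
-- def indent_lines(L):
--     lead = min((len(x) - len(x.lstrip()) for x in L if x != ''), default=0) * ' '
--     out = []
--     cum = ''
--     for x in L:
--         x = x.lstrip()
--         if x.startswith(T_DN):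
--             cum = cum[2:]
--         line = cum + x
--         if x.startswith(T_UP):
--             cum = cum + '  '
--         for piece in break_single_line(line):
--             if 'else' in piece:
--                 piece = piece[2:]
--             out.append(piece if piece == '' else lead + piece)
--     return out
-- ===== Notes on version B (the rewrite author's own statement) =====
-- stated objective: simpler
-- what changed: break_single_line becomes an iterative while-loop with a result accumulator instead of recursion, indent_lines fuses A's five whole-list passes (cumulative-indent temp array, zip, break, flatten, else-unindent, re-indent) into one loop with running indent state, and the leading-whitespace helper becomes min(..., default=0).
-- outside the precondition, e.g. on indent_lines([' ']): A returns [''], B returns ['']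
import Mathlib
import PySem

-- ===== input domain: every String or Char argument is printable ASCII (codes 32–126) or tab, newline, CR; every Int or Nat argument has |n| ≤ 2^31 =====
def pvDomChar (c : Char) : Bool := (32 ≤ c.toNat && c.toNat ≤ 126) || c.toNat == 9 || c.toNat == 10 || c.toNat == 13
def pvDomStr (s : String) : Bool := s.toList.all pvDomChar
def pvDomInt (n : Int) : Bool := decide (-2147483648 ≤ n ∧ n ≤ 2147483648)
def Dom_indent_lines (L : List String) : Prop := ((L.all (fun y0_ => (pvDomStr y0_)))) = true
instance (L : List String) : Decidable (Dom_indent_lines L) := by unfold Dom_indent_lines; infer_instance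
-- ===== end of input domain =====

-- B rewrites A's recursive line-breaker as an iterative accumulator loop and fuses A's five
-- whole-list passes into a single pass with running indent state (objective: simpler; same cost).

-- shared string-constant helpers (both Pythons use the same literals and str built-ins)
def lstripSp (s : List Char) : List Char := s.dropWhile (fun c => c == ' ')  -- exact port of str.lstrip(' ')
def tUp : List (List Char) := ["if ".toList, "type ".toList, "subroutine ".toList, "function ".toList, "do ".toList]
def tDn : List (List Char) := ["endif".toList, "end type".toList, "end subroutine".toList, "end function".toList, "enddo".toList, "end module".toList]
def startsAny (s : List Char) (ps : List (List Char)) : Bool := ps.any (fun p => PySem.Chars.startswith s p)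

-- ===== PORT A =====
-- port of break_single_line (recursive, as in A), made structural by a fuel counter:
-- every self-call strictly shortens the string (the cut point lies beyond the leading spaces),
-- so fuel = length+1 is never exhausted and the fuel-0 fallback is unreachable.
-- The comprehension [s_max.rfind(x)+1 for x in PBL] with its nonzero filter and min collapses
-- to rfind(',')+1, because PBL is the literal [','] and the 'any(x in s_max …)' guard makes
-- that single value nonzero.
def breakAgo : Nat → List Char → List (List Char)
  | 0, s => [s]
  | fuel + 1, s =>
    if 70 ≤ s.length ∧ PySem.Chars.isIn [';'] s = false then
      let nsp := s.length - (lstripSp s).length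
      let smax := s.take 70
      if PySem.Chars.isIn [','] smax = true then
        let cutoff := (PySem.Chars.rfind smax [','] + 1).toNat
        let scut := smax.take cutoff ++ ['&']
        let sr0 := s.drop cutoff
        let srem := if sr0 = ['&'] then [] else sr0
        if (PySem.Chars.replace srem [' '] []).length ≤ 0 then [scut]
        else scut :: breakAgo fuel (List.replicate nsp ' ' ++ srem)
      else [s]
    else [s]

def breakA (s : List Char) : List (List Char) := breakAgo (s.length + 1) s

-- port of get_n_leading_white_spaces; in the singleton-with-nonzero-value case Python leaves
-- a one-element LIST (not an int) and indent_lines later raises TypeError — those inputs are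
-- outside Pre_; there this port returns the number itself.
def nLeadA (L : List (List Char)) : Nat :=
  match (L.filter (fun x => x ≠ [])).map (fun x => x.length - (PySem.Chars.lstrip x).length) with
  | [] => 0
  | [t] => if t = 0 then 0 else t
  | t :: t' :: ts => (PySem.List.min? (t :: t' :: ts) id).getD 0   -- min(temp), temp nonempty here

def indent_lines (L : List String) : List String :=
  let Lc := L.map String.toList
  let n := nLeadA Lc
  let L1 := Lc.map PySem.Chars.lstrip
  let temp := (L1.foldl (fun (p : List (List Char) × List Char) x =>
      let c := if startsAny x tDn then p.2.drop 2 else p.2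
      (p.1 ++ [c], if startsAny x tUp then c ++ [' ', ' '] else c)) ([], [])).1
  let L2 := (temp.zip L1).map (fun sx => sx.1 ++ sx.2)
  let L3 := (L2.map breakA).flatten
  let L4 := L3.map (fun x => if ["else".toList, "elseif".toList].any (fun y => PySem.Chars.isIn y x) then x.drop 2 else x)
  let L5 := L4.map (fun x => if x ≠ [] then List.replicate n ' ' ++ x else x)
  L5.map (fun cs => String.ofList cs)

-- ===== PORT B =====
-- port of Source B's iterative break_single_line (while-loop with a result accumulator), with the
-- same fuel device (fuel = length+1; each pass shortens the current string, fallback unreachable)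
def breakBgo : Nat → List (List Char) → List Char → List (List Char)
  | 0, acc, cur => acc ++ [cur]
  | fuel + 1, acc, cur =>
    if 70 ≤ cur.length ∧ PySem.Chars.isIn [';'] cur = false then
      let head := cur.take 70
      let cutoff := PySem.Chars.rfind head [','] + 1
      if cutoff ≠ 0 then
        let acc' := acc ++ [head.take cutoff.toNat ++ ['&']]
        let r0 := cur.drop cutoff.toNat
        let remain := if r0 = ['&'] then [] else r0
        if (PySem.Chars.replace remain [' '] []).length ≤ 0 then acc'
        else
          let nsp := cur.length - (lstripSp cur).length
          breakBgo fuel acc' (List.replicate nsp ' ' ++ remain)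
      else acc ++ [cur]
    else acc ++ [cur]

def breakB (s : List Char) : List (List Char) := breakBgo (s.length + 1) [] s

-- port of Source B's min(..., default=0)
def nLeadB (L : List (List Char)) : Nat :=
  PySem.List.minD ((L.filter (fun x => x ≠ [])).map (fun x => x.length - (PySem.Chars.lstrip x).length)) id 0

-- port of Source B's single fused pass (running indent state `cum`, output accumulator)
def altLoop (lead : List Char) (cum : List Char) (acc : List (List Char)) : List (List Char) → List (List Char)
  | [] => acc
  | x0 :: rest =>
    let x := PySem.Chars.lstrip x0
    let cum1 := if startsAny x tDn then cum.drop 2 else cum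
    let line := cum1 ++ x
    let cum2 := if startsAny x tUp then cum1 ++ [' ', ' '] else cum1
    let acc' := acc ++ (breakB line).map (fun p =>
        let p1 := if PySem.Chars.isIn "else".toList p then p.drop 2 else p
        if p1 = [] then p1 else lead ++ p1)
    altLoop lead cum2 acc' rest

def indent_lines_alt (L : List String) : List String :=
  let Lc := L.map String.toList
  let lead := List.replicate (nLeadB Lc) ' '
  (altLoop lead [] [] Lc).map (fun cs => String.ofList cs)

-- ===== PRECONDITION & SPEC =====
-- Pre_ excludes lists whose only nonempty line has leading whitespace: there A's
-- get_n_leading_white_spaces returns a one-element list instead of an int, and indent_lines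
-- raises TypeError except in the degenerate case where every resulting line is empty (e.g. [' ']).
def Pre_indent_lines (L : List String) : Prop :=
  ¬ (((L.map String.toList).filter (fun x => x ≠ [])).length = 1 ∧
     (((L.map String.toList).filter (fun x => x ≠ [])).headD []).length -
       (PySem.Chars.lstrip (((L.map String.toList).filter (fun x => x ≠ [])).headD [])).length ≠ 0)
instance (L : List String) : Decidable (Pre_indent_lines L) := by unfold Pre_indent_lines; infer_instance

def pvWitness_indent_lines : List String := ["if a,", "  b", "else", "  c", "endif"]

def Spec_indent_lines (L : List String) (out : List String) : Prop := out = indent_lines_alt L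
instance (L : List String) (out : List String) : Decidable (Spec_indent_lines L out) := by unfold Spec_indent_lines; infer_instance

-- ===== CLAIM (what is proved, stated in full; the proofs are below) =====
def Claim_equal_indent_lines : Prop := ∀ (L : List String), Dom_indent_lines L → Pre_indent_lines L → Spec_indent_lines L (indent_lines L)

-- ===== LEMMAS AND PROOFS =====

-- A's guard «',' in s_max» and B's guard «s_max.rfind(',')+1 ≠ 0» agree
theorem pvGoCases (s sub : List Char) (k : Nat) :
    PySem.Chars.rfind.go s sub k = -1 ∨
      ∃ j : Nat, j ≤ k ∧ PySem.Chars.rfind.go s sub k = j ∧ sub.isPrefixOf (s.drop j) = true := by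
  induction k with
  | zero =>
    by_cases h : sub.isPrefixOf s = true
    · exact Or.inr ⟨0, le_refl 0, by simp [PySem.Chars.rfind.go, h], by simpa using h⟩
    · exact Or.inl (by simp [PySem.Chars.rfind.go, h])
  | succ j ih =>
    by_cases h : sub.isPrefixOf (s.drop (j + 1)) = true
    · exact Or.inr ⟨j + 1, le_refl _, by simp [PySem.Chars.rfind.go, h], h⟩
    · rcases ih with h1 | ⟨i, hi, he, hp⟩
      · exact Or.inl (by simp [PySem.Chars.rfind.go, h, h1])
      · exact Or.inr ⟨i, le_trans hi (Nat.le_succ j), by simp [PySem.Chars.rfind.go, h, he], hp⟩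

theorem pvGoNegOne (s sub : List Char) (k : Nat) (h : PySem.Chars.rfind.go s sub k = -1) :
    ∀ j ≤ k, sub.isPrefixOf (s.drop j) = false := by
  induction k with
  | zero =>
    intro j hj
    have hj0 : j = 0 := Nat.le_zero.mp hj
    subst hj0
    rw [List.drop_zero]
    cases hp : sub.isPrefixOf s
    · rfl
    · exfalso; simp [PySem.Chars.rfind.go, hp] at h
  | succ i ih =>
    intro j hj
    cases hp : sub.isPrefixOf (s.drop (i + 1))
    · have h' : PySem.Chars.rfind.go s sub i = -1 := by
        simpa [PySem.Chars.rfind.go, hp] using h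
      by_cases hji : j ≤ i
      · exact ih h' j hji
      · have : j = i + 1 := by omega
        subst this
        exact hp
    · exfalso
      simp [PySem.Chars.rfind.go, hp] at h
      omega

theorem pvRfindNeIff (s : List Char) :
    PySem.Chars.rfind s [','] ≠ -1 ↔ PySem.Chars.isIn [','] s = true := by
  constructor
  · intro h
    rcases pvGoCases s [','] s.length with h1 | ⟨j, _, he, hp⟩
    · exact absurd (by simpa [PySem.Chars.rfind] using h1) h
    · exact (PySem.Chars.exists_prefix_drop_iff_isIn [','] s).mp
        ⟨j, List.isPrefixOf_iff_prefix.mp hp⟩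
  · intro h hcon
    rcases (PySem.Chars.exists_prefix_drop_iff_isIn [','] s).mpr h with ⟨j, hp⟩
    have hj : j ≤ s.length := by
      by_contra hbig
      have : s.drop j = [] := List.drop_eq_nil_of_le (by omega)
      rw [this] at hp
      simpa using hp.length_le
    have := pvGoNegOne s [','] s.length (by simpa [PySem.Chars.rfind] using hcon) j hj
    rw [List.isPrefixOf_iff_prefix.mpr hp] at this
    exact absurd this (by simp)

theorem breakBgo_eq : ∀ (fuel : Nat) (s : List Char) (acc : List (List Char)),
    breakBgo fuel acc s = acc ++ breakAgo fuel s := by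
  intro fuel
  induction fuel with
  | zero => intro s acc; simp [breakBgo, breakAgo]
  | succ fuel ih =>
    intro s acc
    have hguard : (PySem.Chars.rfind (List.take 70 s) [','] + 1 ≠ 0)
        = (PySem.Chars.isIn [','] (List.take 70 s) = true) := by
      apply propext
      rw [← pvRfindNeIff]
      constructor
      · intro h hr; exact h (by omega)
      · intro h hr; exact h (by omega)
    simp only [breakBgo, breakAgo, hguard]
    split_ifs <;> first | rfl | (rw [ih]; simp)

-- proof-side recursive views of A's pipeline
def tempRec (cum : List Char) : List (List Char) → List (List Char)
  | [] => []
  | x :: xs =>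
    let c1 := if startsAny x tDn then cum.drop 2 else cum
    c1 :: tempRec (if startsAny x tUp then c1 ++ [' ', ' '] else c1) xs

def ARec (cum : List Char) : List (List Char) → List (List Char)
  | [] => []
  | x :: xs =>
    let c1 := if startsAny x tDn then cum.drop 2 else cum
    breakA (c1 ++ x) ++ ARec (if startsAny x tUp then c1 ++ [' ', ' '] else c1) xs

theorem foldl_temp : ∀ (M : List (List Char)) (acc : List (List Char)) (cum : List Char),
    (M.foldl (fun (p : List (List Char) × List Char) x =>
      let c := if startsAny x tDn then p.2.drop 2 else p.2
      (p.1 ++ [c], if startsAny x tUp then c ++ [' ', ' '] else c)) (acc, cum)).1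
    = acc ++ tempRec cum M := by
  intro M
  induction M with
  | nil => intro acc cum; simp [tempRec]
  | cons x xs ih =>
    intro acc cum
    simp only [List.foldl, tempRec]
    rw [ih]
    simp

theorem chain : ∀ (M : List (List Char)) (cum : List Char),
    ((((tempRec cum M).zip M).map (fun sx => sx.1 ++ sx.2)).map breakA).flatten = ARec cum M := by
  intro M
  induction M with
  | nil => intro cum; simp [tempRec, ARec]
  | cons x xs ih =>
    intro cum
    simp only [tempRec, ARec, List.zip_cons_cons, List.map_cons, List.flatten_cons]
    rw [ih]

theorem else_collapse (x : List Char) :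
    (["else".toList, "elseif".toList].any (fun y => PySem.Chars.isIn y x)) = PySem.Chars.isIn "else".toList x := by
  simp only [List.any_cons, List.any_nil, Bool.or_false]
  cases h : PySem.Chars.isIn "else".toList x
  · have h' : PySem.Chars.isIn "elseif".toList x = false := by
      rw [PySem.Chars.isIn_eq_false_iff] at h ⊢
      intro hinf
      exact h (List.IsInfix.trans (by decide) hinf)
    rw [h', Bool.or_false]
  · rw [Bool.true_or]

theorem main_loop (lead : List Char) : ∀ (M : List (List Char)) (cum : List Char) (acc : List (List Char)),
    altLoop lead cum acc M
      = acc ++ ((ARec cum (M.map PySem.Chars.lstrip)).map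
          (fun x => if PySem.Chars.isIn "else".toList x then x.drop 2 else x)).map
          (fun x => if x = [] then x else lead ++ x) := by
  intro M
  induction M with
  | nil => intro cum acc; simp [altLoop, ARec]
  | cons x0 xs ih =>
    intro cum acc
    simp only [altLoop, List.map, ARec]
    rw [ih]
    simp only [breakB, breakBgo_eq, List.nil_append, List.map_append, List.map_map]
    rw [List.append_assoc]
    rfl

theorem nLead_eq (Lc : List (List Char))
    (h : ¬ ((Lc.filter (fun x => x ≠ [])).length = 1 ∧
        ((Lc.filter (fun x => x ≠ [])).headD []).length -
          (PySem.Chars.lstrip ((Lc.filter (fun x => x ≠ [])).headD [])).length ≠ 0)) :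
    nLeadA Lc = nLeadB Lc := by
  unfold nLeadA nLeadB
  rcases hf : Lc.filter (fun x => x ≠ []) with _ | ⟨a, _ | ⟨b, t⟩⟩
  · rfl
  · have ha : a.length - (PySem.Chars.lstrip a).length = 0 := by
      by_contra hne
      exact h (by rw [hf]; exact ⟨rfl, by simpa using hne⟩)
    simp only [List.map_cons, List.map_nil, ha]
    rfl
  · rfl

-- ===== VERDICT (by name: the statement is the Claim_ definition above) =====
theorem indent_lines_spec : Claim_equal_indent_lines := by
  intro L _ hpre
  unfold Pre_indent_lines at hpre
  unfold Spec_indent_lines indent_lines indent_lines_alt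
  simp only []
  rw [nLead_eq _ hpre, foldl_temp]
  simp only [List.nil_append]
  rw [chain, main_loop]
  simp only [List.nil_append]
  have helse : ∀ (l : List (List Char)),
      l.map (fun x => if (["else".toList, "elseif".toList].any fun y => PySem.Chars.isIn y x) = true then List.drop 2 x else x)
        = l.map (fun x => if PySem.Chars.isIn "else".toList x = true then List.drop 2 x else x) := by
    intro l
    apply List.map_congr_left
    intro a _
    rw [else_collapse]
  have hleadf : ∀ (r : List Char) (l : List (List Char)),
      l.map (fun x => if x ≠ [] then r ++ x else x) = l.map (fun x => if x = [] then x else r ++ x) := by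
    intro r l
    apply List.map_congr_left
    intro a _
    by_cases ha : a = [] <;> simp [ha]
  rw [helse, hleadf]
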